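-- pv_equiv track=rewrite | github.com/NinaOosterlaar/Transposon-Truths | trash/preprocessing.py | divide_long_sequences
-- ===== SOURCE A (Python) =====
-- def divide_long_sequences(regions_list, maximum_region_size):
--     """Divide long sequences into smaller regions based on maximum_region_size.
--
--     Args:
--         regions_list (list): List of regions with their positions.
--         maximum_region_size (int): Maximum size of regions.
--
--     Returns:
--         divided_regions_list (list): List of regions divided into smaller segments.
--     """
--     final_regions = {}
--     for chrom in regions_list:
--         regions = regions_list[chrom]
--         final_regions[chrom] = []
--         for region in regions:
--             start, end = region
--             region_size = end - start
--             if region_size > maximum_region_size: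
--                 num_subregions = (region_size + maximum_region_size - 1) // maximum_region_size
--                 subregion_size = region_size // num_subregions
--                 for i in range(num_subregions):
--                     sub_start = start + i * subregion_size
--                     if i == num_subregions - 1:
--                         sub_end = end
--                     else:
--                         sub_end = sub_start + subregion_size
--                     final_regions[chrom].append((sub_start, sub_end))
--             else:
--                 final_regions[chrom].append(region)
--     return final_regions
-- ===== SOURCE B (Python) =====
-- def divide_long_sequences(regions_list, maximum_region_size):
--     """Same result as A: per chromosome, split oversized regions into equal
--     chunks (remainder absorbed by the last). Built recursively with a running
--     cursor instead of A's indexed loop with an i==last branch."""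
--     def chunks(cur, end, k, step):
--         # emit k chunks of width step starting at cur; the last one runs to end
--         if k <= 0:
--             return []
--         if k == 1:
--             return [(cur, end)]
--         return [(cur, cur + step)] + chunks(cur + step, end, k - 1, step)
--
--     def split(start, end):
--         size = end - start
--         if size <= maximum_region_size:
--             return [(start, end)]
--         num = (size + maximum_region_size - 1) // maximum_region_size
--         return chunks(start, end, num, size // num)
--
--     return {chrom: [piece for s, e in regions for piece in split(s, e)]
--             for chrom, regions in regions_list.items()}
-- ===== Notes on version B (the rewrite author's own statement) =====
-- stated objective: alternative
-- what changed: Replaces A's dict-mutating key loop and indexed subregion loop with an i==last branch by a dict comprehension whose oversized regions are split by a recursive helper that advances a running cursor, peeling one chunk per call with the last chunk as the base case.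
-- outside the precondition, e.g. on divide_long_sequences({'a': [(0, 2)]}, 0): A raises ZeroDivisionError, B raises ZeroDivisionError
import Mathlib
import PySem

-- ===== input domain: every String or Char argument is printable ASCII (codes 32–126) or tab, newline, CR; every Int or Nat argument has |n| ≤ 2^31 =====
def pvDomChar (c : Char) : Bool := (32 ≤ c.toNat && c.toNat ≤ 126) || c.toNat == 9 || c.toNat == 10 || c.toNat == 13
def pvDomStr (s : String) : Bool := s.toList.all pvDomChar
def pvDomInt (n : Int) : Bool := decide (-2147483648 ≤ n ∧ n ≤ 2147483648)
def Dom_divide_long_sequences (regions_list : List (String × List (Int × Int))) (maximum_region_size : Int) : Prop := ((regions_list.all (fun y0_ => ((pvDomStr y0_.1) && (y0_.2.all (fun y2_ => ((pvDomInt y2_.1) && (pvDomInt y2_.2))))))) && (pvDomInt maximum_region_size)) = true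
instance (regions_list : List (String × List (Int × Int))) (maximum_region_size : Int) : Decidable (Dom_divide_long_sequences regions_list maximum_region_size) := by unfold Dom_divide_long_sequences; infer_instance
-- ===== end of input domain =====

-- B replaces A's dict-mutating key loop and indexed subregion loop (with its i==last branch)
-- by a dict comprehension whose oversized regions are split by a cursor-advancing recursion.

-- ===== PORT A =====
-- body of A's inner `for region in regions` loop: each `final_regions[chrom].append(...)`
-- is `Dict.modify chrom [] (· ++ [piece])` (the mutable list lives in the dict)
def pvAChrom (m : Int) (chrom : String) (final : PySem.Dict String (List (Int × Int)))
    (region : Int × Int) : PySem.Dict String (List (Int × Int)) :=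
  let start := region.1
  let e := region.2
  let region_size := e - start
  if region_size > m then
    let num_subregions := PySem.Int.floordiv (region_size + m - 1) m
    let subregion_size := PySem.Int.floordiv region_size num_subregions
    (PySem.List.pyRange 0 num_subregions 1).foldl (fun final i =>
      let sub_start := start + i * subregion_size
      let sub_end := if i = num_subregions - 1 then e else sub_start + subregion_size
      final.modify chrom [] (fun l => l ++ [(sub_start, sub_end)])) final
  else final.modify chrom [] (fun l => l ++ [region])

-- `for chrom in regions_list` iterates the dict's keys; `regions_list[chrom]` is an exact
-- lookup since chrom comes from the keys (getD's default is never used)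
def divide_long_sequences (regions_list : List (String × List (Int × Int))) (maximum_region_size : Int) : List (String × List (Int × Int)) :=
  (((PySem.Dict.mk regions_list).keys).foldl (fun final chrom =>
      ((PySem.Dict.mk regions_list).getD chrom []).foldl (pvAChrom maximum_region_size chrom)
        (final.insert chrom []))
    PySem.Dict.empty).items

-- ===== PORT B =====
-- Source B's `chunks`: emit k chunks of width step from a running cursor, last runs to e
def pvChunks (cur e k step : Int) : List (Int × Int) :=
  if k ≤ 0 then []
  else if k = 1 then [(cur, e)]
  else (cur, cur + step) :: pvChunks (cur + step) e (k - 1) step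
termination_by k.toNat
decreasing_by omega

def pvSplit (m s e : Int) : List (Int × Int) :=
  let size := e - s
  if size ≤ m then [(s, e)]
  else
    let num := PySem.Int.floordiv (size + m - 1) m
    pvChunks s e num (PySem.Int.floordiv size num)

def divide_long_sequences_alt (regions_list : List (String × List (Int × Int))) (maximum_region_size : Int) : List (String × List (Int × Int)) :=
  regions_list.map (fun p => (p.1, p.2.flatMap (fun r => pvSplit maximum_region_size r.1 r.2)))

-- ===== PRECONDITION & SPEC =====
-- Pre_ excludes (a) association lists with duplicate chromosome keys, which do not represent a
-- Python dict (the dict collapses them; both programs then agree on the collapsed dict), and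
-- (b) exactly the inputs where A raises ZeroDivisionError: an oversized region with
-- maximum_region_size = 0, or a negative maximum_region_size making num_subregions zero.
def Pre_divide_long_sequences (regions_list : List (String × List (Int × Int))) (maximum_region_size : Int) : Prop :=
  (regions_list.map Prod.fst).Nodup ∧
  ∀ p ∈ regions_list, ∀ r ∈ p.2, r.2 - r.1 > maximum_region_size →
    maximum_region_size ≠ 0 ∧
    PySem.Int.floordiv (r.2 - r.1 + maximum_region_size - 1) maximum_region_size ≠ 0
instance (regions_list : List (String × List (Int × Int))) (maximum_region_size : Int) : Decidable (Pre_divide_long_sequences regions_list maximum_region_size) := by unfold Pre_divide_long_sequences; infer_instance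

def pvWitness_divide_long_sequences : (List (String × List (Int × Int))) × Int :=
  ([("chr1", [(0, 10), (0, 3)]), ("chr2", [(5, 5)])], 4)

def Spec_divide_long_sequences (regions_list : List (String × List (Int × Int))) (maximum_region_size : Int) (out : List (String × List (Int × Int))) : Prop := out = divide_long_sequences_alt regions_list maximum_region_size
instance (regions_list : List (String × List (Int × Int))) (maximum_region_size : Int) (out : List (String × List (Int × Int))) : Decidable (Spec_divide_long_sequences regions_list maximum_region_size out) := by unfold Spec_divide_long_sequences; infer_instance

-- ===== CLAIM (what is proved, stated in full; the proofs are below) =====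
def Claim_equal_divide_long_sequences : Prop := ∀ (regions_list : List (String × List (Int × Int))) (maximum_region_size : Int), Dom_divide_long_sequences regions_list maximum_region_size → Pre_divide_long_sequences regions_list maximum_region_size → Spec_divide_long_sequences regions_list maximum_region_size (divide_long_sequences regions_list maximum_region_size)

-- ===== LEMMAS AND PROOFS =====

-- a modify at a freshly inserted key rewrites that entry in place
lemma pv_modify_after_insert {ν : Type} (d : PySem.Dict String ν) (c : String) (v : ν)
    (d0 : ν) (g : ν → ν) : (d.insert c v).modify c d0 g = d.insert c (g v) := by
  simp [PySem.Dict.modify, PySem.Dict.getD_insert_self, PySem.Dict.insert_insert_self]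

-- a loop of modifies at one key, started right after inserting it, is one insert
lemma pv_foldl_modify_insert {β : Type} (c : String) (g : β → List (Int × Int) → List (Int × Int))
    (xs : List β) (d : PySem.Dict String (List (Int × Int))) (v : List (Int × Int)) :
    xs.foldl (fun d x => d.modify c [] (g x)) (d.insert c v)
      = d.insert c (xs.foldl (fun l x => g x l) v) := by
  induction xs generalizing v with
  | nil => rfl
  | cons x xs ih =>
    simp only [List.foldl_cons]
    rw [pv_modify_after_insert]
    exact ih (g x v)

-- the per-index loop of A, read off the dict: list-level body of pvAChrom
def pvAList (m : Int) (acc : List (Int × Int)) (region : Int × Int) : List (Int × Int) :=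
  let start := region.1
  let e := region.2
  let region_size := e - start
  if region_size > m then
    let num_subregions := PySem.Int.floordiv (region_size + m - 1) m
    let subregion_size := PySem.Int.floordiv region_size num_subregions
    (PySem.List.pyRange 0 num_subregions 1).foldl (fun acc i =>
      let sub_start := start + i * subregion_size
      let sub_end := if i = num_subregions - 1 then e else sub_start + subregion_size
      acc ++ [(sub_start, sub_end)]) acc
  else acc ++ [region]

lemma pv_region_loop (m : Int) (c : String) (rs : List (Int × Int)) :
    ∀ (d : PySem.Dict String (List (Int × Int))) (v : List (Int × Int)),
    rs.foldl (pvAChrom m c) (d.insert c v) = d.insert c (rs.foldl (pvAList m) v) := by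
  induction rs with
  | nil => intro d v; rfl
  | cons r rs ih =>
    intro d v
    simp only [List.foldl_cons]
    have h1 : pvAChrom m c (d.insert c v) r = d.insert c (pvAList m v r) := by
      unfold pvAChrom pvAList
      by_cases h : r.2 - r.1 > m
      · simp only [h, if_true]
        exact pv_foldl_modify_insert c
          (fun i l => l ++ [(r.1 + i * PySem.Int.floordiv (r.2 - r.1)
              (PySem.Int.floordiv (r.2 - r.1 + m - 1) m),
            if i = PySem.Int.floordiv (r.2 - r.1 + m - 1) m - 1 then r.2
            else r.1 + i * PySem.Int.floordiv (r.2 - r.1)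
                (PySem.Int.floordiv (r.2 - r.1 + m - 1) m) +
              PySem.Int.floordiv (r.2 - r.1)
                (PySem.Int.floordiv (r.2 - r.1 + m - 1) m))]) _ d v
      · simp only [h, if_false]
        exact pv_modify_after_insert d c v [] (fun l => l ++ [r])
    rw [h1]
    exact ih d (pvAList m v r)

-- A's branchy subregion map over List.range equals B's cursor recursion, for k ≥ 1
lemma pv_range_eq_chunks (e sub : Int) : ∀ (n : Nat) (s k : Int), k.toNat = n → 1 ≤ k →
    (List.range n).map
        (fun (j : Nat) => ((s + (j : Int) * sub : Int),
          if (j : Int) = k - 1 then e else s + (j : Int) * sub + sub))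
      = pvChunks s e k sub := by
  intro n
  induction n with
  | zero => intro s k hk h1; omega
  | succ n ih =>
    intro s k hk h1
    by_cases hk1 : k = 1
    · subst hk1
      have hn : n = 0 := by omega
      subst hn
      simp [pvChunks]
    · have hk2 : 2 ≤ k := by omega
      rw [List.range_succ_eq_map, List.map_cons, List.map_map]
      rw [pvChunks, if_neg (show ¬ k ≤ 0 from by omega), if_neg hk1]
      refine congrArg₂ List.cons ?_ ?_
      · rw [if_neg (show ¬ ((0 : Nat) : Int) = k - 1 from by push_cast; omega)]
        norm_num
      rw [← ih (s + sub) (k - 1) (by omega) (by omega)]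
      apply List.map_congr_left
      intro j hj
      simp only [Function.comp_apply]
      push_cast
      refine Prod.ext (by simp; ring) ?_
      simp only
      by_cases hje : (j : Int) + 1 = k - 1
      · rw [if_pos (by omega), if_pos (by omega)]
      · rw [if_neg (by omega), if_neg (by omega)]
        ring

lemma pv_aList_append (m : Int) (acc : List (Int × Int)) (r : Int × Int) :
    pvAList m acc r = acc ++ pvSplit m r.1 r.2 := by
  unfold pvAList pvSplit
  by_cases h : r.2 - r.1 > m
  · simp only [h, if_true, not_le.mpr h, if_false]
    rw [PySem.List.foldl_append_singleton_eq_map]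
    refine congrArg (acc ++ ·) ?_
    set k := PySem.Int.floordiv (r.2 - r.1 + m - 1) m with hk
    set sub := PySem.Int.floordiv (r.2 - r.1) k with hsub
    by_cases hk1 : 1 ≤ k
    · have hr : PySem.List.pyRange 0 k 1
          = (List.range k.toNat).map (fun (j : Nat) => (j : Int)) := by
        apply List.ext_getElem
        · simp [PySem.List.length_pyRange_one]
        · intro j hj1 hj2
          simp [PySem.List.getElem_pyRange_one]
      rw [hr, List.map_map]
      rw [← pv_range_eq_chunks r.2 sub k.toNat r.1 k rfl hk1]
      apply List.map_congr_left
      intro j hj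
      simp
    · rw [PySem.List.pyRange_one_eq_nil (by omega), pvChunks, if_pos (by omega)]
      simp
  · simp only [h, if_false, not_lt.mp h, if_true]

lemma pv_fold_aList (m : Int) (rs : List (Int × Int)) (v : List (Int × Int)) :
    rs.foldl (pvAList m) v = v ++ rs.flatMap (fun r => pvSplit m r.1 r.2) := by
  rw [show pvAList m = fun acc r => acc ++ pvSplit m r.1 r.2 from
    funext fun acc => funext fun r => pv_aList_append m acc r]
  exact PySem.List.foldl_append_eq_flatMap _ _ _

lemma pv_keys_loop (m : Int) (rl : PySem.Dict String (List (Int × Int))) (ks : List String) :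
    ∀ (d : PySem.Dict String (List (Int × Int))), ks.Nodup → (∀ k ∈ ks, d.contains k = false) →
    (ks.foldl (fun final chrom =>
        (rl.getD chrom []).foldl (pvAChrom m chrom) (final.insert chrom [])) d).items
      = d.items ++ ks.map (fun c => (c, (rl.getD c []).flatMap (fun r => pvSplit m r.1 r.2))) := by
  induction ks with
  | nil => intro _ _; simp
  | cons c ks ih =>
    intro d hnd hfresh
    simp only [List.foldl_cons, List.map_cons]
    rw [pv_region_loop, pv_fold_aList]
    simp only [List.nil_append]
    rw [ih (d.insert c ((rl.getD c []).flatMap (fun r => pvSplit m r.1 r.2)))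
      (List.nodup_cons.mp hnd).2
      (by
        intro k hk
        rw [PySem.Dict.contains_insert]
        have hne : k ≠ c := fun hkc => (List.nodup_cons.mp hnd).1 (hkc ▸ hk)
        simp [hne, hfresh k (List.mem_cons_of_mem c hk)])]
    rw [PySem.Dict.items_insert_of_not_contains _ _ (hfresh c (List.mem_cons_self))]
    simp

-- ===== VERDICT (by name: the statement is the Claim_ definition above) =====
theorem divide_long_sequences_spec : Claim_equal_divide_long_sequences := by
  intro regions_list m _ hpre
  obtain ⟨hnd, -⟩ := hpre
  unfold Spec_divide_long_sequences divide_long_sequences divide_long_sequences_alt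
  have hkeys : (PySem.Dict.mk regions_list : PySem.Dict String (List (Int × Int))).keys
      = regions_list.map Prod.fst := by
    simp [PySem.Dict.keys]
  have hkn : (PySem.Dict.mk regions_list : PySem.Dict String (List (Int × Int))).keys.Nodup := by
    rw [hkeys]; exact hnd
  rw [pv_keys_loop m (PySem.Dict.mk regions_list) _ PySem.Dict.empty hkn
    (by intro k _; simp [PySem.Dict.contains_empty])]
  rw [hkeys]
  simp only [PySem.Dict.empty, List.nil_append, List.map_map]
  apply List.map_congr_left
  intro p hp
  have hmem : (p.1, p.2) ∈ (PySem.Dict.mk regions_list :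
      PySem.Dict String (List (Int × Int))).items := by
    simpa using hp
  rw [Function.comp_apply, PySem.Dict.getD_of_mem_items _ hmem hkn []]
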